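-- pv_equiv track=rewrite | github.com/rajbsk/KG-conv-rec | parlai/agents/kbrd/modules.py | _edge_list
-- ===== SOURCE A (Python) =====
-- from collections import defaultdict
--
-- def _edge_list(kg, n_entity, hop):
--     edge_list = []
--     for h in range(hop):
--         for entity in range(n_entity):
--             # add self loop
--             edge_list.append((entity, entity, 185))
--             if entity not in kg:
--                 continue
--             for tail_and_relation in kg[entity]:
--                 if entity != tail_and_relation[1] and tail_and_relation[0] != 185:
--                     edge_list.append((entity, tail_and_relation[1], tail_and_relation[0]))
--                     # edge_list.append((tail_and_relation[1], entity, tail_and_relation[0]))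
--
--     relation_cnt = defaultdict(int)
--     relation_idx = {}
--     for h, t, r in edge_list:
--         relation_cnt[r] += 1
--     for h, t, r in edge_list:
--         if relation_cnt[r] > 10 and r not in relation_idx:
--             relation_idx[r] = len(relation_idx)
--
--     return [(h, t, relation_idx[r]) for h, t, r in edge_list if relation_cnt[r] > 10], len(relation_idx)
-- ===== SOURCE B (Python) =====
-- from collections import Counter
--
-- def _edge_list(kg, n_entity, hop):
--     if hop <= 0:
--         return [], 0
--     # single-hop edges, built once via nested comprehension
--     single = [edge
--               for ent in range(n_entity)
--               for edge in [(ent, ent, 185)] +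
--                           [(ent, t, r) for r, t in kg.get(ent, [])
--                            if t != ent and r != 185]]
--     cnt = Counter(r for _, _, r in single)
--     order = list(dict.fromkeys(r for _, _, r in single))
--     surv = [r for r in order if hop * cnt[r] > 10]
--     ridx = {r: i for i, r in enumerate(surv)}
--     filtered = [(h, t, ridx[r]) for h, t, r in single if r in ridx]
--     return filtered * hop, len(ridx)
-- ===== Notes on version B (the rewrite author's own statement) =====
-- stated objective: alternative
-- what changed: B builds the single-hop edge list once by comprehension instead of hop nested passes, counts relations with a Counter on that list, dedups relations in first-occurrence order with dict.fromkeys, keeps a relation iff hop*count > 10, and returns the filtered reindexed list replicated hop times by list multiplication.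
import Mathlib
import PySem

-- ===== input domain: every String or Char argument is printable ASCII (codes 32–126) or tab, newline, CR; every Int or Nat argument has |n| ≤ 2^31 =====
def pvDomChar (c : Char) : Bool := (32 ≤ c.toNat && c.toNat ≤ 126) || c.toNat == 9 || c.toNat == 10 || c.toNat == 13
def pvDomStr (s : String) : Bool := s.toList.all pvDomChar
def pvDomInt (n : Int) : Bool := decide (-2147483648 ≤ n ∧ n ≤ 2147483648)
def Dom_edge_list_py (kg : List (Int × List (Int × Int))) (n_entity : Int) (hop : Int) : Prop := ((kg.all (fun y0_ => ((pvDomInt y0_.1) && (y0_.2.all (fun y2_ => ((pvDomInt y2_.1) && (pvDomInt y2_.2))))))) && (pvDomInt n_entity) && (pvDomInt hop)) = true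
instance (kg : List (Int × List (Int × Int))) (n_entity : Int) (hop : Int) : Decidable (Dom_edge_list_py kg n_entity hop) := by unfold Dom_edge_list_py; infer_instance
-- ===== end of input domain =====

-- B builds the single-hop edge list once by comprehension, counts relations with a Counter,
-- dedups relations in first-occurrence order, keeps those with hop*count > 10, and replicates
-- the filtered reindexed list hop times (objective: alternative decomposition).

-- ===== PORT A =====
-- counting loop `for h,t,r in edge_list: relation_cnt[r] += 1` modelled as a function update
def pvCnt (l : List (Int × Int × Int)) (f : Int → Int) : Int → Int :=
  l.foldl (fun f x => fun r => if r = x.2.2 then f x.2.2 + 1 else f r) f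

-- relation_idx modelled as the list of its keys in insertion order (value = position = idxOf)
def pvIdxFold (c : Int → Bool) (l : List (Int × Int × Int)) (acc : List Int) : List Int :=
  l.foldl (fun a x => if c x.2.2 && !(a.contains x.2.2) then a ++ [x.2.2] else a) acc

-- body of A's entity loop: self loop, then the tails of kg[entity] (dict lookup = first match)
def pvEntA (kg : List (Int × List (Int × Int))) (acc : List (Int × Int × Int)) (e : Int) :
    List (Int × Int × Int) :=
  let acc := acc ++ [(e, e, 185)]
  match kg.lookup e with
  | none => acc
  | some ts => ts.foldl (fun a tr => if e ≠ tr.2 ∧ tr.1 ≠ 185 then a ++ [(e, tr.2, tr.1)] else a) acc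

def edge_list_py (kg : List (Int × List (Int × Int))) (n_entity : Int) (hop : Int) :
    (List (Int × Int × Int)) × Int :=
  let el := (PySem.List.pyRange 0 hop 1).foldl
      (fun acc _ => (PySem.List.pyRange 0 n_entity 1).foldl (pvEntA kg) acc) []
  let cnt := pvCnt el (fun _ => 0)
  let idx := pvIdxFold (fun r => decide (cnt r > 10)) el []
  (el.filterMap (fun x => if cnt x.2.2 > 10 then some (x.1, x.2.1, (idx.idxOf x.2.2 : Int)) else none),
   (idx.length : Int))

-- ===== PORT B =====
-- dict.fromkeys dedup: first-occurrence order, hand-ported (exact: Python keeps first occurrence)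
def pvDedup : List Int → List Int → List Int
  | [], _ => []
  | r :: rest, seen => if r ∈ seen then pvDedup rest seen else r :: pvDedup rest (r :: seen)

-- the single-hop comprehension of Source B
def pvSingle (kg : List (Int × List (Int × Int))) (n_entity : Int) : List (Int × Int × Int) :=
  (PySem.List.pyRange 0 n_entity 1).flatMap (fun ent =>
    (ent, ent, 185) :: ((kg.lookup ent).getD []).filterMap
      (fun rt => if rt.2 ≠ ent ∧ rt.1 ≠ 185 then some (ent, rt.2, rt.1) else none))

def edge_list_py_alt (kg : List (Int × List (Int × Int))) (n_entity : Int) (hop : Int) :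
    (List (Int × Int × Int)) × Int :=
  if hop ≤ 0 then ([], 0) else
  let single := pvSingle kg n_entity
  let rels := single.map (fun x => x.2.2)
  -- Counter lookup = multiplicity in rels
  let cnt : Int → Int := fun r => ((rels.count r : Nat) : Int)
  let surv := (pvDedup rels []).filter (fun r => decide (hop * cnt r > 10))
  let filtered := (single.filter (fun x => surv.contains x.2.2)).map
      (fun x => (x.1, x.2.1, (surv.idxOf x.2.2 : Int)))
  ((List.replicate hop.toNat filtered).flatten, (surv.length : Int))

-- ===== PRECONDITION & SPEC =====
def Spec_edge_list_py (kg : List (Int × List (Int × Int))) (n_entity : Int) (hop : Int) (out : (List (Int × Int × Int)) × Int) : Prop := out = edge_list_py_alt kg n_entity hop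
instance (kg : List (Int × List (Int × Int))) (n_entity : Int) (hop : Int) (out : (List (Int × Int × Int)) × Int) : Decidable (Spec_edge_list_py kg n_entity hop out) := by unfold Spec_edge_list_py; infer_instance

-- ===== CLAIM (what is proved, stated in full; the proofs are below) =====
def Claim_equal_edge_list_py : Prop := ∀ (kg : List (Int × List (Int × Int))) (n_entity : Int) (hop : Int), Dom_edge_list_py kg n_entity hop → Spec_edge_list_py kg n_entity hop (edge_list_py kg n_entity hop)

-- ===== LEMMAS AND PROOFS =====

-- A's tail loop appends exactly B's per-entity filterMap
theorem pv_tails_eq (e : Int) (ts : List (Int × Int)) (a : List (Int × Int × Int)) :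
    ts.foldl (fun a tr => if e ≠ tr.2 ∧ tr.1 ≠ 185 then a ++ [(e, tr.2, tr.1)] else a) a
      = a ++ ts.filterMap (fun rt => if rt.2 ≠ e ∧ rt.1 ≠ 185 then some (e, rt.2, rt.1) else none) := by
  induction ts generalizing a with
  | nil => simp
  | cons t ts ih =>
    by_cases hc : e ≠ t.2 ∧ t.1 ≠ 185
    · have hc' : t.2 ≠ e ∧ t.1 ≠ 185 := ⟨hc.1.symm, hc.2⟩
      simp [ih, hc, hc']
    · have hc' : ¬(t.2 ≠ e ∧ t.1 ≠ 185) := fun h' => hc ⟨h'.1.symm, h'.2⟩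
      simp [ih, hc, hc']

theorem pv_entA_eq (kg : List (Int × List (Int × Int))) (acc : List (Int × Int × Int)) (e : Int) :
    pvEntA kg acc e = acc ++ (e, e, 185) :: ((kg.lookup e).getD []).filterMap
      (fun rt => if rt.2 ≠ e ∧ rt.1 ≠ 185 then some (e, rt.2, rt.1) else none) := by
  unfold pvEntA
  cases kg.lookup e with
  | none => simp
  | some ts => simp [pv_tails_eq]

-- A's h-loop body appends one copy of B's single-hop list per iteration
theorem pv_outer_eq (kg : List (Int × List (Int × Int))) (n : Int) (hs : List Int)
    (acc : List (Int × Int × Int)) :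
    hs.foldl (fun acc _ => (PySem.List.pyRange 0 n 1).foldl (pvEntA kg) acc) acc
      = acc ++ hs.flatMap (fun _ => pvSingle kg n) := by
  have inner : ∀ (es : List Int) (a : List (Int × Int × Int)),
      es.foldl (pvEntA kg) a = a ++ es.flatMap (fun e => (e, e, 185) ::
        ((kg.lookup e).getD []).filterMap
          (fun rt => if rt.2 ≠ e ∧ rt.1 ≠ 185 then some (e, rt.2, rt.1) else none)) := by
    intro es; induction es with
    | nil => simp
    | cons e es ih => intro a; simp [ih, pv_entA_eq]
  induction hs generalizing acc with
  | nil => simp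
  | cons h hs ih =>
    rw [List.foldl_cons, inner, List.flatMap_cons, ih, List.append_assoc]; rfl

-- the counting fold counts occurrences of each relation
theorem pv_cnt_eq (l : List (Int × Int × Int)) (f : Int → Int) (r : Int) :
    pvCnt l f r = f r + (l.countP (fun x => x.2.2 == r) : Int) := by
  induction l generalizing f with
  | nil => simp [pvCnt]
  | cons x l ih =>
    simp only [pvCnt, List.foldl_cons] at *
    rw [ih]
    by_cases h : r = x.2.2 <;> simp [List.countP_cons, h] <;> omega

theorem pv_count_copies (t : List (Int × Int × Int)) (hs : List Int) (p : Int × Int × Int → Bool) :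
    (hs.flatMap (fun _ => t)).countP p = hs.length * t.countP p := by
  induction hs with
  | nil => simp
  | cons h hs ih => simp [List.countP_append, ih, Nat.succ_mul]; omega

-- Counter lookup = countP over the edges
theorem pv_count_map (s : List (Int × Int × Int)) (r : Int) :
    (s.map (fun x => x.2.2)).count r = s.countP (fun x => x.2.2 == r) := by
  induction s with
  | nil => simp
  | cons x s ih => by_cases h : x.2.2 = r <;> simp [h, ih]

-- pvIdxFold facts (A side)
theorem pv_idx_mono (c : Int → Bool) (l : List (Int × Int × Int)) (a : List Int) (r : Int)
    (h : r ∈ a) : r ∈ pvIdxFold c l a := by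
  induction l generalizing a with
  | nil => simpa [pvIdxFold]
  | cons x l ih =>
    simp only [pvIdxFold, List.foldl_cons]
    split
    · exact ih _ (List.mem_append_left _ h)
    · exact ih _ h

theorem pv_idx_complete (c : Int → Bool) (l : List (Int × Int × Int)) (a : List Int)
    (x : Int × Int × Int) (hx : x ∈ l) (hc : c x.2.2 = true) : x.2.2 ∈ pvIdxFold c l a := by
  induction l generalizing a with
  | nil => simp at hx
  | cons y l ih =>
    simp only [pvIdxFold, List.foldl_cons]
    rcases List.mem_cons.mp hx with rfl | hx
    · apply pv_idx_mono
      by_cases hm : x.2.2 ∈ a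
      · split <;> simp [hm]
      · simp [hc, hm]
    · split <;> exact ih _ hx

theorem pv_idx_absorb (c : Int → Bool) (l : List (Int × Int × Int)) (a : List Int)
    (h : ∀ x ∈ l, c x.2.2 = true → x.2.2 ∈ a) : pvIdxFold c l a = a := by
  induction l with
  | nil => simp [pvIdxFold]
  | cons x l ih =>
    simp only [pvIdxFold, List.foldl_cons]
    have hstep : (if c x.2.2 && !(a.contains x.2.2) then a ++ [x.2.2] else a) = a := by
      by_cases hc : c x.2.2 = true
      · have hm : x.2.2 ∈ a := h x (by simp) hc
        simp [hm]
      · simp [hc]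
    rw [hstep]
    exact ih (fun y hy => h y (by simp [hy]))

theorem pv_idx_copies (c : Int → Bool) (t : List (Int × Int × Int)) (hs : List Int) :
    pvIdxFold c (hs.flatMap (fun _ => t)) (pvIdxFold c t []) = pvIdxFold c t [] := by
  induction hs with
  | nil => simp [pvIdxFold]
  | cons h hs ih =>
    have hsplit : pvIdxFold c (t ++ hs.flatMap (fun _ => t)) (pvIdxFold c t [])
        = pvIdxFold c (hs.flatMap (fun _ => t)) (pvIdxFold c t (pvIdxFold c t [])) := by
      simp [pvIdxFold, List.foldl_append]
    have habs : pvIdxFold c t (pvIdxFold c t []) = pvIdxFold c t [] :=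
      pv_idx_absorb _ _ _ (fun x hx hc => pv_idx_complete c t [] x hx hc)
    simp only [List.flatMap_cons, hsplit, habs, ih]

theorem pv_idx_append (c : Int → Bool) (l₁ l₂ : List (Int × Int × Int)) (a : List Int) :
    pvIdxFold c (l₁ ++ l₂) a = pvIdxFold c l₂ (pvIdxFold c l₁ a) := by
  simp [pvIdxFold, List.foldl_append]

-- membership in pvDedup
theorem pv_dedup_mem (l : List Int) (seen : List Int) (r : Int) :
    r ∈ pvDedup l seen ↔ r ∈ l ∧ r ∉ seen := by
  induction l generalizing seen with
  | nil => simp [pvDedup]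
  | cons x l ih =>
    simp only [pvDedup]
    split
    · rename_i hx
      rw [ih]
      constructor
      · rintro ⟨h1, h2⟩; exact ⟨List.mem_cons_of_mem _ h1, h2⟩
      · rintro ⟨h1, h2⟩
        rcases List.mem_cons.mp h1 with rfl | h1
        · exact absurd hx h2
        · exact ⟨h1, h2⟩
    · rename_i hx
      constructor
      · intro h
        rcases List.mem_cons.mp h with rfl | h
        · exact ⟨List.mem_cons_self, hx⟩
        · rcases (ih _).mp h with ⟨h1, h2⟩
          exact ⟨List.mem_cons_of_mem _ h1, fun hm => h2 (List.mem_cons_of_mem _ hm)⟩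
      · rintro ⟨h1, h2⟩
        rcases List.mem_cons.mp h1 with rfl | h1
        · exact List.mem_cons_self
        · by_cases hrx : r = x
          · subst hrx; exact List.mem_cons_self
          · exact List.mem_cons_of_mem _ ((ih _).mpr ⟨h1, fun hm => by
              rcases List.mem_cons.mp hm with h | h
              · exact hrx h
              · exact h2 h⟩)

theorem pvIdxFold_cons (c : Int → Bool) (x : Int × Int × Int) (l : List (Int × Int × Int))
    (acc : List Int) :
    pvIdxFold c (x :: l) acc
      = pvIdxFold c l (if c x.2.2 && !(acc.contains x.2.2) then acc ++ [x.2.2] else acc) := rfl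

-- A's index fold = B's filter of the first-occurrence dedup
theorem pv_idx_dedup (c : Int → Bool) (l : List (Int × Int × Int)) (seen acc : List Int)
    (hinv : ∀ r, r ∈ acc ↔ (r ∈ seen ∧ c r = true)) :
    pvIdxFold c l acc = acc ++ (pvDedup (l.map (fun x => x.2.2)) seen).filter c := by
  induction l generalizing seen acc with
  | nil => simp [pvIdxFold, pvDedup]
  | cons x l ih =>
    rw [pvIdxFold_cons]
    simp only [List.map_cons, pvDedup]
    by_cases hseen : x.2.2 ∈ seen
    · have hcond : (c x.2.2 && !(acc.contains x.2.2)) = false := by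
        by_cases hc : c x.2.2 = true
        · simp [hc, List.contains_eq_mem, (hinv _).mpr ⟨hseen, hc⟩]
        · simp [Bool.eq_false_iff.mpr hc]
      rw [hcond, if_neg (by simp), if_pos hseen]
      exact ih seen acc hinv
    · rw [if_neg hseen]
      by_cases hc : c x.2.2 = true
      · have hnacc : x.2.2 ∉ acc := fun hm => hseen ((hinv _).mp hm).1
        have hcond : (c x.2.2 && !(acc.contains x.2.2)) = true := by
          simp [hc, List.contains_eq_mem, hnacc]
        have hinv' : ∀ r, r ∈ acc ++ [x.2.2] ↔ (r ∈ x.2.2 :: seen ∧ c r = true) := by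
          intro r
          constructor
          · intro hm
            rcases List.mem_append.mp hm with hm | hm
            · rcases (hinv r).mp hm with ⟨h1, h2⟩
              exact ⟨List.mem_cons_of_mem _ h1, h2⟩
            · have hrx : r = x.2.2 := by simpa using hm
              subst hrx; exact ⟨List.mem_cons_self, hc⟩
          · rintro ⟨h1, h2⟩
            rcases List.mem_cons.mp h1 with rfl | h1
            · exact List.mem_append.mpr (Or.inr (by simp))
            · exact List.mem_append.mpr (Or.inl ((hinv r).mpr ⟨h1, h2⟩))
        rw [hcond, if_pos rfl, ih (x.2.2 :: seen) (acc ++ [x.2.2]) hinv']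
        simp [hc]
      · have hcond : (c x.2.2 && !(acc.contains x.2.2)) = false := by
          simp [Bool.eq_false_iff.mpr hc]
        have hinv' : ∀ r, r ∈ acc ↔ (r ∈ x.2.2 :: seen ∧ c r = true) := by
          intro r
          rw [hinv r]
          constructor
          · rintro ⟨h1, h2⟩; exact ⟨List.mem_cons_of_mem _ h1, h2⟩
          · rintro ⟨h1, h2⟩
            rcases List.mem_cons.mp h1 with rfl | h1
            · exact absurd h2 hc
            · exact ⟨h1, h2⟩
        rw [hcond, if_neg (by simp), ih (x.2.2 :: seen) acc hinv']
        simp [Bool.eq_false_iff.mpr hc]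

-- filterMap of an if-some-else-none = filter then map
theorem pv_filterMap_if {α β : Type} (q : α → Bool) (f : α → β) (l : List α) :
    l.filterMap (fun x => if q x then some (f x) else none) = (l.filter q).map f := by
  induction l with
  | nil => simp
  | cons x l ih => by_cases h : q x <;> simp [h, ih]

-- ===== VERDICT (by name: the statement is the Claim_ definition above) =====
theorem edge_list_py_spec : Claim_equal_edge_list_py := by
  intro kg n hop _
  unfold Spec_edge_list_py edge_list_py edge_list_py_alt
  dsimp only
  set s := pvSingle kg n with hsdef
  set hs := PySem.List.pyRange 0 hop 1 with hhs
  have hel : hs.foldl (fun acc _ => (PySem.List.pyRange 0 n 1).foldl (pvEntA kg) acc) []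
      = hs.flatMap (fun _ => s) := by
    simpa using pv_outer_eq kg n hs []
  rw [hel]
  rcases (by omega : hop ≤ 0 ∨ 0 < hop) with hneg | hpos
  · have h0 : hs = [] := by rw [hhs]; exact PySem.List.pyRange_one_eq_nil (by omega)
    rw [h0, if_pos hneg]
    simp [pvIdxFold]
  rw [if_neg (by omega)]
  have hlen : hs.length = hop.toNat := by
    rw [hhs]; simp [PySem.List.length_pyRange_one]
  have hcond : ∀ r, (pvCnt (hs.flatMap fun _ => s) (fun _ => 0) r > 10)
      ↔ (hop * (((s.map (fun x => x.2.2)).count r : Nat) : Int) > 10) := by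
    intro r
    rw [pv_cnt_eq, pv_count_copies, hlen, pv_count_map]
    rcases (by omega : hop ≤ 0 ∨ 0 < hop) with h | h
    · have h0 : hop.toNat = 0 := by omega
      have hle : hop * ((s.countP (fun x => x.2.2 == r) : Nat) : Int) ≤ 0 :=
        mul_nonpos_of_nonpos_of_nonneg h (by positivity)
      simp only [h0, Nat.zero_mul, Nat.cast_zero, zero_add]
      omega
    · have ht : ((hop.toNat : Nat) : Int) = hop := by omega
      push_cast
      rw [show ((hop.toNat : Nat) : Int) = hop from ht]
      omega
  have hcB : (fun r => decide (pvCnt (hs.flatMap fun _ => s) (fun _ => 0) r > 10))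
      = (fun r => decide (hop * (((s.map (fun x => x.2.2)).count r : Nat) : Int) > 10)) :=
    funext fun r => decide_eq_decide.mpr (hcond r)
  set c := fun r => decide (hop * (((s.map (fun x => x.2.2)).count r : Nat) : Int) > 10) with hcdef
  have hsingle : pvIdxFold c s [] = (pvDedup (s.map fun x => x.2.2) []).filter c := by
    simpa using pv_idx_dedup c s [] [] (by simp)
  have hidx : pvIdxFold (fun r => decide (pvCnt (hs.flatMap fun _ => s) (fun _ => 0) r > 10))
      (hs.flatMap fun _ => s) [] = (pvDedup (s.map fun x => x.2.2) []).filter c := by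
    rw [hcB]
    have h0 : hs = 0 :: PySem.List.pyRange 1 hop 1 := by
      rw [hhs]; simpa using PySem.List.pyRange_one_cons (show (0:Int) < hop from hpos)
    rw [h0, List.flatMap_cons, pv_idx_append]
    rw [← hsingle]
    exact pv_idx_copies c s (PySem.List.pyRange 1 hop 1)
  rw [hidx]
  set surv := (pvDedup (s.map fun x => x.2.2) []).filter c with hsurv
  -- the filtered list: A's filterMap over the replicated list = replicate of B's filtered list
  have hmemc : ∀ x ∈ s, (decide (pvCnt (hs.flatMap fun _ => s) (fun _ => 0) x.2.2 > 10))
      = surv.contains x.2.2 := by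
    intro x hx
    have hc : (decide (pvCnt (hs.flatMap fun _ => s) (fun _ => 0) x.2.2 > 10)) = c x.2.2 := by
      rw [hcdef]; exact decide_eq_decide.mpr (hcond x.2.2)
    rw [hc]
    simp only [hsurv, List.contains_eq_mem, List.mem_filter, pv_dedup_mem]
    by_cases h : c x.2.2 = true
    · have hm : x.2.2 ∈ s.map (fun x => x.2.2) := List.mem_map_of_mem hx
      simp [h, hm]
    · simp [Bool.eq_false_iff.mpr h]
  have hfilt : s.filterMap (fun x => if pvCnt (hs.flatMap fun _ => s) (fun _ => 0) x.2.2 > 10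
        then some (x.1, x.2.1, (surv.idxOf x.2.2 : Int)) else none)
      = (s.filter (fun x => surv.contains x.2.2)).map
        (fun x => (x.1, x.2.1, (surv.idxOf x.2.2 : Int))) := by
    rw [← pv_filterMap_if (fun x => surv.contains x.2.2)
        (fun x => (x.1, x.2.1, (surv.idxOf x.2.2 : Int))) s]
    apply List.filterMap_congr
    intro x hx
    rw [← hmemc x hx]
    by_cases h : pvCnt (hs.flatMap fun _ => s) (fun _ => 0) x.2.2 > 10 <;> simp [h]
  have hrep : (hs.flatMap fun _ => s).filterMap
        (fun x => if pvCnt (hs.flatMap fun _ => s) (fun _ => 0) x.2.2 > 10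
          then some (x.1, x.2.1, (surv.idxOf x.2.2 : Int)) else none)
      = (List.replicate hop.toNat ((s.filter (fun x => surv.contains x.2.2)).map
          (fun x => (x.1, x.2.1, (surv.idxOf x.2.2 : Int))))).flatten := by
    rw [List.filterMap_flatMap]
    have : hs.flatMap (fun _ => s.filterMap
        (fun x => if pvCnt (hs.flatMap fun _ => s) (fun _ => 0) x.2.2 > 10
          then some (x.1, x.2.1, (surv.idxOf x.2.2 : Int)) else none))
        = hs.flatMap (fun _ => (s.filter (fun x => surv.contains x.2.2)).map
          (fun x => (x.1, x.2.1, (surv.idxOf x.2.2 : Int)))) := by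
      rw [hfilt]
    rw [this, List.flatMap_def, List.map_const', hlen]
  exact Prod.ext (by simpa using hrep) rfl
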